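-- pv_equiv track=rewrite | github.com/4lvarofilho/Hackaton_SantoDigital2024 | DesafioZero/exercise_02_advanced.py | pairs_with_smallest_difference
-- ===== SOURCE A (Python) =====
-- def pairs_with_smallest_difference(arr, allow_duplicates=True, sorted_pairs=False, unique_pairs=False):
--     # Ordena o array para tornar mais fácil encontrar pares com a menor diferença
--     arr.sort()
--     smallest_difference = float('inf')
--     pairs = []
--
--     # Percorre o array para encontrar a menor diferença
--     for i in range(len(arr) - 1):
--         for j in range(i + 1, len(arr)):
--             if not allow_duplicates and arr[i] == arr[j]:
--                 continue
--             difference = abs(arr[i] - arr[j])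
--             if difference < smallest_difference:
--                 smallest_difference = difference
--                 pairs = [(arr[i], arr[j])]
--             elif difference == smallest_difference:
--                 pairs.append((arr[i], arr[j]))
--     # Remove pares duplicados se unique_pairs for True
--     if unique_pairs:
--         pairs = list(set(tuple(sorted(pair)) for pair in pairs))
--     # Ordena os pares se sorted_pairs for True
--     if sorted_pairs:
--         pairs = [tuple(sorted(pair)) for pair in pairs]
--         pairs.sort()
--     return pairs
-- ===== SOURCE B (Python) =====
-- def pairs_with_smallest_difference(arr, allow_duplicates=True, sorted_pairs=False, unique_pairs=False):
--     s = sorted(arr)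
--     # candidate values for adjacency: all elements, or the distinct values only
--     if allow_duplicates:
--         base = s
--     else:
--         base = []
--         for x in s:
--             if not base or base[-1] != x:
--                 base.append(x)
--     d = None
--     for p, q in zip(base, base[1:]):
--         g = q - p
--         if d is None or g < d:
--             d = g
--     pairs = []
--     if d is not None:
--         n = len(s)
--         for i in range(n):
--             x = s[i]
--             j = i + 1
--             if not allow_duplicates:
--                 while j < n and s[j] == x:
--                     j += 1
--             while j < n and s[j] - x == d:
--                 pairs.append((x, s[j]))
--                 j += 1
--     if unique_pairs:
--         pairs = sorted(set(pairs))
--     elif sorted_pairs: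
--         pairs.sort()
--     return pairs
-- ===== Notes on version B (the rewrite author's own statement) =====
-- stated objective: faster
-- what changed: Replaces the O(n^2) all-pairs scan with a running minimum by: sort, compute the smallest eligible difference from adjacent elements (adjacent distinct values when duplicates are disallowed) in one pass, then collect only the matching short windows after each element; equivalence is on the return value only (A additionally sorts its argument in place).
import Mathlib
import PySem

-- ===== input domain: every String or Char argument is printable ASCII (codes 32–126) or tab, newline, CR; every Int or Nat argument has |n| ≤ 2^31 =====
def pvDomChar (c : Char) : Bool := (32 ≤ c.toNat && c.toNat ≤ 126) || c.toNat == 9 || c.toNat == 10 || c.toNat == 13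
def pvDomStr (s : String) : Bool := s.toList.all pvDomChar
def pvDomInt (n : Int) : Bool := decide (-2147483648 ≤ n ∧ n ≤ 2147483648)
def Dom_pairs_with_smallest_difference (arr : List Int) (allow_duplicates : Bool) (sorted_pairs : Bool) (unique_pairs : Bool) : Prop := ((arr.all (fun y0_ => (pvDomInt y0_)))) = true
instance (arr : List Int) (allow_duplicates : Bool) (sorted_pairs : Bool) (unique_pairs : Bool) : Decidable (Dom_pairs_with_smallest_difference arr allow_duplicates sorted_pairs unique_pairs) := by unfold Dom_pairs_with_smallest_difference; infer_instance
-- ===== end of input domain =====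

-- B replaces A's O(n^2) all-pairs scan by sort + one adjacent-gap pass + collecting only the matching
-- short windows (faster, asymptotic); equivalence is about the RETURN value only (A also sorts its
-- argument in place, B does not mutate it).

-- ===== PORT A =====
-- tuple(sorted(pair)) for a 2-tuple: sorted([a,b]) is [b,a] iff b < a (exact)
def pvSortPair (p : Int × Int) : Int × Int := if p.2 < p.1 then (p.2, p.1) else (p.1, p.2)

def pairs_with_smallest_difference (arr : List Int) (allow_duplicates : Bool) (sorted_pairs : Bool) (unique_pairs : Bool) : List (Int × Int) :=
  -- arr.sort()  (in-place in Python; the equivalence claimed here is about the return value)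
  let a := PySem.List.sorted arr (fun x => x)
  -- smallest_difference = float('inf') is modelled as (none : Option Int): every int is < inf, none == int
  let st := (PySem.List.pyRange 0 ((a.length : Int) - 1)).foldl (fun st i =>
    (PySem.List.pyRange (i + 1) (a.length : Int)).foldl (fun (st : Option Int × List (Int × Int)) j =>
      if !allow_duplicates && (PySem.List.pyGetD a i 0 == PySem.List.pyGetD a j 0) then st
      else
        let difference := |PySem.List.pyGetD a i 0 - PySem.List.pyGetD a j 0|
        match st.1 with
        | none => (some difference, [(PySem.List.pyGetD a i 0, PySem.List.pyGetD a j 0)])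
        | some sd =>
          if difference < sd then (some difference, [(PySem.List.pyGetD a i 0, PySem.List.pyGetD a j 0)])
          else if difference == sd then (some sd, st.2 ++ [(PySem.List.pyGetD a i 0, PySem.List.pyGetD a j 0)])
          else st) st) ((none : Option Int), ([] : List (Int × Int)))
  let pairs := st.2
  -- list(set(...)): CPython iterates the set in hash order, which is not modelled; Pre_ keeps only
  -- sorted_pairs=True alongside unique_pairs=True, where the final sort makes the set order irrelevant
  let pairs := if unique_pairs then (PySem.Set.ofList (pairs.map pvSortPair) : List (Int × Int)) else pairs
  -- pairs.sort() on 2-tuples: lexicographic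
  if sorted_pairs then PySem.List.sorted2 (pairs.map pvSortPair) (fun p => p.1) (fun p => p.2) else pairs

-- ===== PORT B =====
-- the base-building loop of B: keep one copy of each run of equal values of the sorted list
def pvDedupLast (s : List Int) : List Int :=
  s.foldl (fun base x => if base.isEmpty || !(base.getLast? == some x) then base ++ [x] else base) []

-- while j < n and s[j] == x: j += 1   (j stays ≥ 0, so it is a Nat here)
def pvSkipEq (s : List Int) (x : Int) (j : Nat) : Nat :=
  if h : j < s.length ∧ PySem.List.pyGetD s (j : Int) 0 = x then pvSkipEq s x (j + 1) else j
termination_by s.length - j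
decreasing_by omega

-- while j < n and s[j] - x == d: pairs.append((x, s[j])); j += 1
def pvCollect (s : List Int) (x d : Int) (j : Nat) (acc : List (Int × Int)) : List (Int × Int) :=
  if h : j < s.length ∧ PySem.List.pyGetD s (j : Int) 0 - x = d then
    pvCollect s x d (j + 1) (acc ++ [(x, PySem.List.pyGetD s (j : Int) 0)])
  else acc
termination_by s.length - j
decreasing_by omega

def pairs_with_smallest_difference_alt (arr : List Int) (allow_duplicates : Bool) (sorted_pairs : Bool) (unique_pairs : Bool) : List (Int × Int) :=
  let s := PySem.List.sorted arr (fun x => x)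
  let base := if allow_duplicates then s else pvDedupLast s
  -- for p, q in zip(base, base[1:]): g = q - p; if d is None or g < d: d = g
  let d := (base.zip (PySem.List.slice base (some 1))).foldl (fun d pq =>
      match d with
      | none => some (pq.2 - pq.1)
      | some dv => if pq.2 - pq.1 < dv then some (pq.2 - pq.1) else some dv) none
  let pairs := match d with
    | none => []
    | some dv =>
      (PySem.List.pyRange 0 (s.length : Int)).foldl (fun acc i =>
        let x := PySem.List.pyGetD s i 0
        -- j = i + 1; i ranges over 0..n-1 so i.toNat is exact
        let j := if !allow_duplicates then pvSkipEq s x (i.toNat + 1) else i.toNat + 1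
        pvCollect s x dv j acc) []
  -- sorted(set(pairs)) / pairs.sort(): lexicographic on 2-tuples
  if unique_pairs then PySem.List.sorted2 (PySem.Set.ofList pairs : List (Int × Int)) (fun p => p.1) (fun p => p.2)
  else if sorted_pairs then PySem.List.sorted2 pairs (fun p => p.1) (fun p => p.2)
  else pairs

-- ===== PRECONDITION & SPEC =====
-- Pre_ excludes unique_pairs=True together with sorted_pairs=False: there A returns the deduplicated
-- pairs in CPython's set-iteration (hash) order, an accident of the implementation; B returns them sorted.
def Pre_pairs_with_smallest_difference (arr : List Int) (allow_duplicates : Bool) (sorted_pairs : Bool) (unique_pairs : Bool) : Prop :=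
  ¬ (unique_pairs = true ∧ sorted_pairs = false)
instance (arr : List Int) (allow_duplicates : Bool) (sorted_pairs : Bool) (unique_pairs : Bool) : Decidable (Pre_pairs_with_smallest_difference arr allow_duplicates sorted_pairs unique_pairs) := by unfold Pre_pairs_with_smallest_difference; infer_instance

def pvWitness_pairs_with_smallest_difference : List Int × Bool × Bool × Bool := ([3, 1, 4, 1, 5], true, true, true)

def Spec_pairs_with_smallest_difference (arr : List Int) (allow_duplicates : Bool) (sorted_pairs : Bool) (unique_pairs : Bool) (out : List (Int × Int)) : Prop := out = pairs_with_smallest_difference_alt arr allow_duplicates sorted_pairs unique_pairs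
instance (arr : List Int) (allow_duplicates : Bool) (sorted_pairs : Bool) (unique_pairs : Bool) (out : List (Int × Int)) : Decidable (Spec_pairs_with_smallest_difference arr allow_duplicates sorted_pairs unique_pairs out) := by unfold Spec_pairs_with_smallest_difference; infer_instance

-- ===== CLAIM (what is proved, stated in full; the proofs are below) =====
def Claim_equal_pairs_with_smallest_difference : Prop := ∀ (arr : List Int) (allow_duplicates : Bool) (sorted_pairs : Bool) (unique_pairs : Bool), Dom_pairs_with_smallest_difference arr allow_duplicates sorted_pairs unique_pairs → Pre_pairs_with_smallest_difference arr allow_duplicates sorted_pairs unique_pairs → Spec_pairs_with_smallest_difference arr allow_duplicates sorted_pairs unique_pairs (pairs_with_smallest_difference arr allow_duplicates sorted_pairs unique_pairs)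

-- ===== LEMMAS AND PROOFS =====

-- ---- abstract descriptions of the two computations ----
def pvDiff (p : Int × Int) : Int := |p.1 - p.2|

def pvOmin : Option Int → Option Int → Option Int
  | none, b => b
  | some x, none => some x
  | some x, some y => some (min x y)

def pvMinD (l : List (Int × Int)) : Option Int :=
  l.foldl (fun m p => pvOmin m (some (pvDiff p))) none

def pvStepA (st : Option Int × List (Int × Int)) (p : Int × Int) : Option Int × List (Int × Int) :=
  match st.1 with
  | none => (some (pvDiff p), [p])
  | some sd =>
    if pvDiff p < sd then (some (pvDiff p), [p])
    else if pvDiff p == sd then (some sd, st.2 ++ [p])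
    else st

def pvElig (allow : Bool) (p : Int × Int) : Bool := allow || !(p.1 == p.2)

def pvPl : List Int → List (Int × Int)
  | [] => []
  | x :: t => t.map (fun y => (x, y)) ++ pvPl t

def pvQ (allow : Bool) (a : List Int) : List (Int × Int) := (pvPl a).filter (pvElig allow)

def pvCoreA (allow : Bool) (a : List Int) : List (Int × Int) :=
  (pvQ allow a).filter (fun p => pvMinD (pvQ allow a) == some (pvDiff p))

def pvAm : List Int → Option Int
  | [] => none
  | [_] => none
  | x :: y :: t => pvOmin (some (y - x)) (pvAm (y :: t))

def pvDedFrom : Int → List Int → List Int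
  | _, [] => []
  | w, x :: t => if x == w then pvDedFrom w t else x :: pvDedFrom x t

def pvDedS : List Int → List Int
  | [] => []
  | x :: t => x :: pvDedFrom x t

def pvW (d : Int) (allow : Bool) : List Int → List (Int × Int)
  | [] => []
  | x :: t =>
    ((if allow then t else t.dropWhile (fun y => y == x)).takeWhile (fun y => y - x == d)).map (fun y => (x, y))
      ++ pvW d allow t

def pvCoreB (allow : Bool) (a : List Int) : List (Int × Int) :=
  match pvAm (if allow then a else pvDedS a) with
  | none => []
  | some d => pvW d allow a

-- ---- pvOmin / pvMinD toolbox ----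
lemma pvOmin_none_right (a : Option Int) : pvOmin a none = a := by cases a <;> rfl

lemma pvOmin_assoc (a b c : Option Int) : pvOmin (pvOmin a b) c = pvOmin a (pvOmin b c) := by
  cases a <;> cases b <;> cases c <;> simp [pvOmin, min_assoc]

lemma pvMinD_foldl_init (l : List (Int × Int)) (m : Option Int) :
    l.foldl (fun m p => pvOmin m (some (pvDiff p))) m = pvOmin m (pvMinD l) := by
  induction l generalizing m with
  | nil => simp [pvMinD, pvOmin_none_right]
  | cons p t ih =>
    simp only [pvMinD, List.foldl_cons] at *
    rw [ih, ih (pvOmin none (some (pvDiff p))), ← pvOmin_assoc]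
    rfl

lemma pvMinD_cons (p : Int × Int) (l : List (Int × Int)) :
    pvMinD (p :: l) = pvOmin (some (pvDiff p)) (pvMinD l) := by
  simp only [pvMinD, List.foldl_cons]
  rw [pvMinD_foldl_init]
  rfl

lemma pvMinD_append (l₁ l₂ : List (Int × Int)) :
    pvMinD (l₁ ++ l₂) = pvOmin (pvMinD l₁) (pvMinD l₂) := by
  simp only [pvMinD, List.foldl_append]
  rw [pvMinD_foldl_init]
  rfl

lemma pvMinD_eq_none_iff (l : List (Int × Int)) : pvMinD l = none ↔ l = [] := by
  cases l with
  | nil => simp [pvMinD]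
  | cons p t => rw [pvMinD_cons]; cases pvMinD t <;> simp [pvOmin]

lemma pvMinD_le_of_mem {l : List (Int × Int)} {p : Int × Int} :
    ∀ {v : Int}, p ∈ l → pvMinD l = some v → v ≤ pvDiff p := by
  induction l with
  | nil => intro v hp _; cases hp
  | cons q t ih =>
    intro v hp h
    rw [pvMinD_cons] at h
    rcases List.mem_cons.1 hp with rfl | hpt
    · cases hm : pvMinD t <;> rw [hm] at h <;> simp [pvOmin] at h <;> omega
    · have ht : t ≠ [] := List.ne_nil_of_mem hpt
      cases hm : pvMinD t with
      | none => exact absurd ((pvMinD_eq_none_iff t).1 hm) ht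
      | some w =>
        rw [hm] at h
        simp [pvOmin] at h
        have := ih hpt hm
        omega

lemma pvDiff_of_le {x y : Int} (h : x ≤ y) : pvDiff (x, y) = y - x := by
  simp only [pvDiff]
  rw [abs_of_nonpos (by omega : x - y ≤ 0)]
  omega

-- ---- A's fold characterised: running minimum + the pairs achieving it ----
lemma pvFoldA_char (l : List (Int × Int)) :
    l.foldl pvStepA ((none : Option Int), ([] : List (Int × Int)))
      = (pvMinD l, l.filter (fun p => pvMinD l == some (pvDiff p))) := by
  induction l using List.reverseRecOn with
  | nil => simp [pvMinD]
  | append_singleton l p ih =>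
    have hMp : pvMinD [p] = some (pvDiff p) := by
      rw [pvMinD_cons]; simp [pvMinD, pvOmin_none_right]
    have hM : pvMinD (l ++ [p]) = pvOmin (pvMinD l) (some (pvDiff p)) := by
      rw [pvMinD_append, hMp]
    rw [List.foldl_append, ih]
    simp only [List.foldl_cons, List.foldl_nil]
    cases hm : pvMinD l with
    | none =>
      have hl := (pvMinD_eq_none_iff l).1 hm
      subst hl
      simp [pvStepA, pvMinD_cons, pvMinD, pvOmin]
    | some v =>
      rw [hm] at hM
      rcases lt_trichotomy (pvDiff p) v with hlt | heq | hgt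
      · have hMv : pvMinD (l ++ [p]) = some (pvDiff p) := by
          rw [hM]; simp [pvOmin, min_eq_right hlt.le]
        rw [hMv]
        have hfl : l.filter (fun q => (some (pvDiff p) : Option Int) == some (pvDiff q)) = [] := by
          apply List.filter_eq_nil_iff.2
          intro q hq
          have := pvMinD_le_of_mem hq hm
          simp only [beq_iff_eq, Option.some.injEq]
          omega
        simp [pvStepA, hlt, List.filter_append, hfl]
        intro a b hab
        have := pvMinD_le_of_mem hab hm
        omega
      · subst heq
        have hMv : pvMinD (l ++ [p]) = some (pvDiff p) := by
          rw [hM]; simp [pvOmin]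
        rw [hMv]
        simp [pvStepA, List.filter_append]
      · have hMv : pvMinD (l ++ [p]) = some v := by
          rw [hM]; simp [pvOmin, min_eq_left hgt.le]
        rw [hMv]
        have h1 : ¬ (pvDiff p < v) := by omega
        have h2 : (pvDiff p == v) = false := by simp; omega
        have h3 : ((some v : Option Int) == some (pvDiff p)) = false := by simp; omega
        simp [pvStepA, h1, h2, List.filter_append, h3]
        omega

-- ---- bridges: port A's index loops = fold of pvStepA over the eligible pair list ----
lemma pvRange_nil {x y : Int} (h : y ≤ x) : PySem.List.pyRange x y = [] := by
  apply List.eq_nil_iff_forall_not_mem.2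
  intro z hz
  have := PySem.List.mem_pyRange_one.1 hz
  omega

lemma pvGetNat (a : List Int) {k : Nat} (h : k < a.length) :
    PySem.List.pyGetD a (k : Int) 0 = a[k] := by
  rw [PySem.List.pyGetD_eq_getElem a 0 (by exact_mod_cast Nat.zero_le k) (by exact_mod_cast h)]
  simp

lemma pvFoldRangeAux {σ : Type} (a : List Int) (f : σ → Int → σ) :
    ∀ (n k : Nat) (st : σ), a.length ≤ k + n →
      (PySem.List.pyRange (k : Int) (a.length : Int)).foldl (fun st j => f st (PySem.List.pyGetD a j 0)) st
        = (a.drop k).foldl f st := by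
  intro n
  induction n with
  | zero =>
    intro k st h
    have hk : a.length ≤ k := by omega
    rw [pvRange_nil (by exact_mod_cast hk), List.drop_eq_nil_of_le hk]
    rfl
  | succ n ihn =>
    intro k st h
    by_cases hk : k < a.length
    · have hki : (k : Int) < (a.length : Int) := by exact_mod_cast hk
      rw [PySem.List.pyRange_one_cons hki, List.foldl_cons,
        show ((k : Int) + 1) = ((k + 1 : Nat) : Int) by push_cast; ring,
        ihn (k + 1) _ (by omega), pvGetNat a hk, List.drop_eq_getElem_cons hk, List.foldl_cons]
    · have hk' : a.length ≤ k := by omega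
      rw [pvRange_nil (by exact_mod_cast hk'), List.drop_eq_nil_of_le hk']
      rfl

lemma pvFoldRange {σ : Type} (a : List Int) (f : σ → Int → σ) (k : Nat) (st : σ) :
    (PySem.List.pyRange (k : Int) (a.length : Int)).foldl (fun st j => f st (PySem.List.pyGetD a j 0)) st
      = (a.drop k).foldl f st :=
  pvFoldRangeAux a f a.length k st (by omega)

lemma pvBodyA_eq (allow : Bool) (xv y : Int) (st : Option Int × List (Int × Int)) :
    (if !allow && (xv == y) then st
     else
       let difference := |xv - y|
       match st.1 with
       | none => (some difference, [(xv, y)])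
       | some sd =>
         if difference < sd then (some difference, [(xv, y)])
         else if difference == sd then (some sd, st.2 ++ [(xv, y)])
         else st)
      = (if pvElig allow (xv, y) then pvStepA st (xv, y) else st) := by
  obtain ⟨m, ps⟩ := st
  cases allow <;> by_cases hxy : xv = y <;> cases m <;>
    simp [pvElig, pvStepA, pvDiff, hxy]

lemma pvInnerA (a : List Int) (allow : Bool) (xv : Int) (k : Nat)
    (st : Option Int × List (Int × Int)) :
    (PySem.List.pyRange (k : Int) (a.length : Int)).foldl (fun (st : Option Int × List (Int × Int)) j =>
        if !allow && (xv == PySem.List.pyGetD a j 0) then st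
        else
          let difference := |xv - PySem.List.pyGetD a j 0|
          match st.1 with
          | none => (some difference, [(xv, PySem.List.pyGetD a j 0)])
          | some sd =>
            if difference < sd then (some difference, [(xv, PySem.List.pyGetD a j 0)])
            else if difference == sd then (some sd, st.2 ++ [(xv, PySem.List.pyGetD a j 0)])
            else st) st
      = (a.drop k).foldl (fun st y => if pvElig allow (xv, y) then pvStepA st (xv, y) else st) st :=
  (PySem.List.foldl_congr_mem _ _ _ _ (fun acc j _ => pvBodyA_eq allow xv (PySem.List.pyGetD a j 0) acc)).trans
    (pvFoldRange a (fun st y => if pvElig allow (xv, y) then pvStepA st (xv, y) else st) k st)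

lemma pvPl_short {l : List Int} (h : l.length ≤ 1) : pvPl l = [] := by
  match l, h with
  | [], _ => rfl
  | [x], _ => rfl

lemma pvOuterAAux (a : List Int) (allow : Bool) :
    ∀ (n k : Nat) (st : Option Int × List (Int × Int)), a.length ≤ k + n →
      (PySem.List.pyRange (k : Int) ((a.length : Int) - 1)).foldl (fun st i =>
        (PySem.List.pyRange (i + 1) (a.length : Int)).foldl (fun (st : Option Int × List (Int × Int)) j =>
          if !allow && (PySem.List.pyGetD a i 0 == PySem.List.pyGetD a j 0) then st
          else
            let difference := |PySem.List.pyGetD a i 0 - PySem.List.pyGetD a j 0|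
            match st.1 with
            | none => (some difference, [(PySem.List.pyGetD a i 0, PySem.List.pyGetD a j 0)])
            | some sd =>
              if difference < sd then (some difference, [(PySem.List.pyGetD a i 0, PySem.List.pyGetD a j 0)])
              else if difference == sd then (some sd, st.2 ++ [(PySem.List.pyGetD a i 0, PySem.List.pyGetD a j 0)])
              else st) st) st
        = (pvPl (a.drop k)).foldl (fun st p => if pvElig allow p then pvStepA st p else st) st := by
  intro n
  induction n with
  | zero =>
    intro k st h
    have hk : a.length ≤ k := by omega
    have hki : (a.length : Int) - 1 ≤ (k : Int) := by
      have : (a.length : Int) ≤ (k : Int) := by exact_mod_cast hk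
      omega
    rw [pvRange_nil hki, List.drop_eq_nil_of_le hk, List.foldl_nil]
    rfl
  | succ n ihn =>
    intro k st h
    by_cases hk1 : (k : Int) < (a.length : Int) - 1
    · have hk : k < a.length := by omega
      rw [PySem.List.pyRange_one_cons hk1]
      simp only [List.foldl_cons]
      rw [pvGetNat a hk,
        show ((k : Int) + 1) = ((k + 1 : Nat) : Int) by push_cast; ring,
        pvInnerA a allow (a[k]) (k + 1),
        ihn (k + 1) _ (by omega),
        List.drop_eq_getElem_cons hk]
      simp only [pvPl, List.foldl_append, List.foldl_map]
    · have hki : (a.length : Int) - 1 ≤ (k : Int) := by omega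
      rw [pvRange_nil hki, List.foldl_nil,
        pvPl_short (by rw [List.length_drop]; omega), List.foldl_nil]

lemma pvOuterA (a : List Int) (allow : Bool) (k : Nat) (st : Option Int × List (Int × Int)) :
    (PySem.List.pyRange (k : Int) ((a.length : Int) - 1)).foldl (fun st i =>
      (PySem.List.pyRange (i + 1) (a.length : Int)).foldl (fun (st : Option Int × List (Int × Int)) j =>
        if !allow && (PySem.List.pyGetD a i 0 == PySem.List.pyGetD a j 0) then st
        else
          let difference := |PySem.List.pyGetD a i 0 - PySem.List.pyGetD a j 0|
          match st.1 with
          | none => (some difference, [(PySem.List.pyGetD a i 0, PySem.List.pyGetD a j 0)])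
          | some sd =>
            if difference < sd then (some difference, [(PySem.List.pyGetD a i 0, PySem.List.pyGetD a j 0)])
            else if difference == sd then (some sd, st.2 ++ [(PySem.List.pyGetD a i 0, PySem.List.pyGetD a j 0)])
            else st) st) st
      = (pvPl (a.drop k)).foldl (fun st p => if pvElig allow p then pvStepA st p else st) st :=
  pvOuterAAux a allow a.length k st (by omega)

lemma pvPortA_eq (arr : List Int) (allow sp up : Bool) :
    pairs_with_smallest_difference arr allow sp up =
      (let pairs := pvCoreA allow (PySem.List.sorted arr (fun x => x));
       let pairs := if up then (PySem.Set.ofList (pairs.map pvSortPair) : List (Int × Int)) else pairs;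
       if sp then PySem.List.sorted2 (pairs.map pvSortPair) (fun p => p.1) (fun p => p.2) else pairs) := by
  have h := pvOuterA (PySem.List.sorted arr (fun x => x)) allow 0
    ((none : Option Int), ([] : List (Int × Int)))
  simp only [Nat.cast_zero, List.drop_zero] at h
  have hfold := h.trans
    ((PySem.List.foldl_if_eq_foldl_filter (pvElig allow) pvStepA
        (pvPl (PySem.List.sorted arr (fun x => x))) ((none : Option Int), ([] : List (Int × Int)))).trans
      (pvFoldA_char (pvQ allow (PySem.List.sorted arr (fun x => x)))))
  simp only [pairs_with_smallest_difference]
  rw [hfold]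
  rfl

-- ---- bridges: port B's loops = pvCoreB ----
lemma pvDedupAux (t : List Int) :
    ∀ (u : List Int) (w : Int),
      t.foldl (fun base x => if base.isEmpty || !(base.getLast? == some x) then base ++ [x] else base) (u ++ [w])
        = (u ++ [w]) ++ pvDedFrom w t := by
  induction t with
  | nil => intro u w; simp [pvDedFrom]
  | cons x t ih =>
    intro u w
    rw [List.foldl_cons]
    by_cases hxw : x = w
    · have hc : ((u ++ [w]).isEmpty || !((u ++ [w]).getLast? == some x)) = false := by
        simp [List.getLast?_concat, hxw]
      rw [hc]
      simp only [Bool.false_eq_true, if_false]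
      rw [ih u w]
      simp [pvDedFrom, hxw]
    · have hc : ((u ++ [w]).isEmpty || !((u ++ [w]).getLast? == some x)) = true := by
        simp [List.getLast?_concat, hxw]
        exact fun h => absurd h.symm hxw
      rw [hc]
      simp only [if_true]
      rw [show (u ++ [w]) ++ [x] = (u ++ [w]) ++ [x] from rfl, ih (u ++ [w]) x]
      simp [pvDedFrom, hxw, List.append_assoc]

lemma pvDedupLast_eq (s : List Int) : pvDedupLast s = pvDedS s := by
  cases s with
  | nil => rfl
  | cons x t =>
    unfold pvDedupLast
    rw [List.foldl_cons]
    have h0 : (([] : List Int).isEmpty || !(([] : List Int).getLast? == some x)) = true := by simp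
    rw [h0]
    simp only [if_true, List.nil_append]
    have := pvDedupAux t [] x
    simp only [List.nil_append] at this
    rw [this]
    rfl

lemma pvZStep_eq (m : Option Int) (g : Int) :
    (match m with
     | none => some g
     | some dv => if g < dv then some g else some dv) = pvOmin m (some g) := by
  cases m with
  | none => rfl
  | some dv =>
    simp only [pvOmin, min_def]
    split_ifs <;> simp <;> omega

lemma pvZipFold_eq (l : List Int) (m : Option Int) :
    (l.zip (PySem.List.slice l (some 1))).foldl (fun d pq =>
        match d with
        | none => some (pq.2 - pq.1)
        | some dv => if pq.2 - pq.1 < dv then some (pq.2 - pq.1) else some dv) m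
      = pvOmin m (pvAm l) := by
  rw [PySem.List.slice_from l (by norm_num : (0 : Int) ≤ 1)]
  have h1 : ((1 : Int)).toNat = 1 := rfl
  rw [h1]
  induction l using pvAm.induct generalizing m with
  | case1 => simp [pvAm, pvOmin_none_right]
  | case2 x => simp [pvAm, pvOmin_none_right]
  | case3 x y t ih =>
    have hd : List.drop 1 (x :: y :: t) = y :: t := rfl
    rw [hd, List.zip_cons_cons, List.foldl_cons]
    have hd2 : List.drop 1 (y :: t) = t := rfl
    have ih' := ih (m := (match m with
      | none => some ((x, y).2 - (x, y).1)
      | some dv => if (x, y).2 - (x, y).1 < dv then some ((x, y).2 - (x, y).1) else some dv))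
    rw [hd2] at ih'
    rw [ih']
    rw [pvZStep_eq m ((x, y).2 - (x, y).1)]
    rw [pvOmin_assoc]
    rfl

lemma pvSkipEq_eq (s : List Int) (x : Int) (j : Nat) :
    pvSkipEq s x j = j + ((s.drop j).takeWhile (fun y => y == x)).length := by
  induction j using pvSkipEq.induct (s := s) (x := x) with
  | case1 j h ih =>
    rw [pvSkipEq, dif_pos h, ih]
    obtain ⟨hj, hx⟩ := h
    have hsx : s[j] = x := by rw [← pvGetNat s hj]; exact hx
    rw [List.drop_eq_getElem_cons hj, List.takeWhile_cons]
    simp [hsx]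
    omega
  | case2 j h =>
    rw [pvSkipEq, dif_neg h]
    push_neg at h
    by_cases hj : j < s.length
    · have hx := h hj
      have hsx : ¬ (s[j] = x) := by rw [← pvGetNat s hj]; exact hx
      rw [List.drop_eq_getElem_cons hj, List.takeWhile_cons]
      simp [hsx]
    · rw [List.drop_eq_nil_of_le (by omega)]
      simp

lemma pvCollect_eq (s : List Int) (x d : Int) (j : Nat) (acc : List (Int × Int)) :
    pvCollect s x d j acc
      = acc ++ ((s.drop j).takeWhile (fun y => y - x == d)).map (fun y => (x, y)) := by
  induction j, acc using pvCollect.induct (s := s) (x := x) (d := d) with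
  | case1 j acc h ih =>
    rw [pvCollect, dif_pos h, ih]
    obtain ⟨hj, hx⟩ := h
    have hsx : s[j] - x = d := by rw [← pvGetNat s hj]; exact hx
    rw [List.drop_eq_getElem_cons hj, List.takeWhile_cons, pvGetNat s hj]
    simp [hsx, List.append_assoc]
  | case2 j acc h =>
    rw [pvCollect, dif_neg h]
    push_neg at h
    by_cases hj : j < s.length
    · have hx := h hj
      have hsx : ¬ (s[j] - x = d) := by rw [← pvGetNat s hj]; exact hx
      rw [List.drop_eq_getElem_cons hj, List.takeWhile_cons]
      simp [hsx]
    · rw [List.drop_eq_nil_of_le (by omega)]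
      simp

lemma pvDropLenTakeWhile (p : Int → Bool) (l : List Int) :
    l.drop (l.takeWhile p).length = l.dropWhile p := by
  set n := (l.takeWhile p).length with hn
  conv_lhs => rw [← List.takeWhile_append_dropWhile (p := p) (l := l)]
  rw [hn, List.drop_left]

lemma pvOuterBAux (a : List Int) (d : Int) (allow : Bool) :
    ∀ (n k : Nat) (acc : List (Int × Int)), a.length ≤ k + n →
      (PySem.List.pyRange (k : Int) (a.length : Int)).foldl (fun acc i =>
          pvCollect a (PySem.List.pyGetD a i 0) d
            (if !allow then pvSkipEq a (PySem.List.pyGetD a i 0) (i.toNat + 1) else i.toNat + 1) acc) acc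
        = acc ++ pvW d allow (a.drop k) := by
  intro n
  induction n with
  | zero =>
    intro k acc h
    have hk : a.length ≤ k := by omega
    rw [pvRange_nil (by exact_mod_cast hk), List.drop_eq_nil_of_le hk, List.foldl_nil]
    simp [pvW]
  | succ n ihn =>
    intro k acc h
    by_cases hk : k < a.length
    · have hki : (k : Int) < (a.length : Int) := by exact_mod_cast hk
      rw [PySem.List.pyRange_one_cons hki]
      simp only [List.foldl_cons, Int.toNat_natCast]
      rw [pvGetNat a hk,
        show ((k : Int) + 1) = ((k + 1 : Nat) : Int) by push_cast; ring,
        ihn (k + 1) _ (by omega),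
        List.drop_eq_getElem_cons hk]
      have hj1 : a.drop (if !allow then pvSkipEq a (a[k]) (k + 1) else k + 1)
          = (if allow then a.drop (k + 1) else (a.drop (k + 1)).dropWhile (fun y => y == a[k])) := by
        cases allow with
        | true => rfl
        | false =>
          simp only [Bool.not_false, if_true, if_false, Bool.false_eq_true]
          rw [pvSkipEq_eq, ← List.drop_drop, pvDropLenTakeWhile]
      rw [pvCollect_eq, hj1]
      simp only [pvW]
      rw [List.append_assoc]
    · have hk' : a.length ≤ k := by omega
      rw [pvRange_nil (by exact_mod_cast hk'), List.drop_eq_nil_of_le hk', List.foldl_nil]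
      simp [pvW]

lemma pvOuterB (a : List Int) (d : Int) (allow : Bool) (acc : List (Int × Int)) :
    (PySem.List.pyRange 0 (a.length : Int)).foldl (fun acc i =>
        pvCollect a (PySem.List.pyGetD a i 0) d
          (if !allow then pvSkipEq a (PySem.List.pyGetD a i 0) (i.toNat + 1) else i.toNat + 1) acc) acc
      = acc ++ pvW d allow a := by
  have h := pvOuterBAux a d allow a.length 0 acc (by omega)
  simpa only [Nat.cast_zero, List.drop_zero] using h

lemma pvPairsB (s : List Int) (allow : Bool) (o : Option Int) :
    (match o with
     | none => ([] : List (Int × Int))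
     | some dv =>
       (PySem.List.pyRange 0 (s.length : Int)).foldl (fun acc i =>
           pvCollect s (PySem.List.pyGetD s i 0) dv
             (if !allow then pvSkipEq s (PySem.List.pyGetD s i 0) (i.toNat + 1) else i.toNat + 1) acc) [])
      = (match o with
         | none => ([] : List (Int × Int))
         | some dv => pvW dv allow s) := by
  cases o with
  | none => rfl
  | some dv => exact (pvOuterB s dv allow []).trans (List.nil_append _)

lemma pvPortB_eq (arr : List Int) (allow sp up : Bool) :
    pairs_with_smallest_difference_alt arr allow sp up =
      (let pairs := pvCoreB allow (PySem.List.sorted arr (fun x => x));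
       if up then PySem.List.sorted2 (PySem.Set.ofList pairs : List (Int × Int)) (fun p => p.1) (fun p => p.2)
       else if sp then PySem.List.sorted2 pairs (fun p => p.1) (fun p => p.2)
       else pairs) := by
  simp only [pairs_with_smallest_difference_alt]
  have hbase : (if allow then PySem.List.sorted arr (fun x => x)
        else pvDedupLast (PySem.List.sorted arr (fun x => x)))
      = (if allow then PySem.List.sorted arr (fun x => x)
        else pvDedS (PySem.List.sorted arr (fun x => x))) := by
    cases allow <;> simp [pvDedupLast_eq]
  rw [hbase, pvZipFold_eq]
  have hnone : ∀ b : Option Int, pvOmin none b = b := fun b => rfl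
  rw [hnone, pvPairsB]
  rfl

-- ---- the mathematics: on a sorted list both cores agree ----
lemma pvPl_mem_le : ∀ {a : List Int}, a.Pairwise (· ≤ ·) → ∀ p ∈ pvPl a, p.1 ≤ p.2 := by
  intro a
  induction a with
  | nil => intro _ p hp; simp [pvPl] at hp
  | cons x t ih =>
    intro hs p hp
    obtain ⟨hx, ht⟩ := List.pairwise_cons.1 hs
    simp only [pvPl, List.mem_append, List.mem_map] at hp
    rcases hp with ⟨y, hy, rfl⟩ | hp2
    · exact hx y hy
    · exact ih ht p hp2

lemma pvFilter_ne_eq_dropWhile {x : Int} :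
    ∀ {t : List Int}, (x :: t).Pairwise (· ≤ ·) →
      t.filter (fun y => !(y == x)) = t.dropWhile (fun y => y == x) := by
  intro t
  induction t with
  | nil => intro _; rfl
  | cons y t' ih =>
    intro hs
    have hxy : x ≤ y := (List.pairwise_cons.1 hs).1 y (by simp)
    have hs' : (x :: t').Pairwise (· ≤ ·) :=
      hs.sublist ((List.sublist_cons_self y t').cons₂ x)
    by_cases hyx : y = x
    · simp only [List.filter_cons, List.dropWhile_cons]
      simp [hyx, ih hs']
    · simp only [List.filter_cons, List.dropWhile_cons]
      simp [hyx]
      intro z hz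
      have hyz := (List.pairwise_cons.1 (List.pairwise_cons.1 hs).2).1 z hz
      omega

lemma pvFilter_eq_takeWhile {x d : Int} :
    ∀ {t : List Int}, t.Pairwise (· ≤ ·) → (∀ y ∈ t, d ≤ y - x) →
      t.filter (fun y => y - x == d) = t.takeWhile (fun y => y - x == d) := by
  intro t
  induction t with
  | nil => intro _ _; rfl
  | cons y t' ih =>
    intro hs hb
    rw [List.filter_cons, List.takeWhile_cons]
    by_cases hy : y - x = d
    · simp only [hy, beq_self_eq_true, if_true]
      rw [ih (List.pairwise_cons.1 hs).2 (fun z hz => hb z (List.mem_cons_of_mem y hz))]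
    · have hgt : d < y - x := by have := hb y (by simp); omega
      have hpy : ((y - x == d) : Bool) = false := by simp [hy]
      rw [hpy]
      simp only [Bool.false_eq_true, if_false]
      apply List.filter_eq_nil_iff.2
      intro z hz
      have hyz := (List.pairwise_cons.1 hs).1 z hz
      simp only [beq_iff_eq]
      omega

lemma pvMinD_map_cons {x : Int} :
    ∀ {t : List Int}, (x :: t).Pairwise (· ≤ ·) → t ≠ [] →
      pvMinD (t.map (fun y => (x, y))) = some (t.headI - x) := by
  intro t
  induction t with
  | nil => intro _ h; exact absurd rfl h
  | cons y t' ih =>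
    intro hs _
    have hxy : x ≤ y := (List.pairwise_cons.1 hs).1 y (by simp)
    cases t' with
    | nil =>
      rw [List.map_cons, pvMinD_cons]
      simp [pvMinD, pvOmin_none_right, pvDiff_of_le hxy, List.headI]
    | cons y2 t'' =>
      rw [List.map_cons, pvMinD_cons]
      have hs' : (x :: y2 :: t'').Pairwise (· ≤ ·) :=
        hs.sublist ((List.sublist_cons_self y (y2 :: t'')).cons₂ x)
      rw [ih hs' (by simp)]
      have hyy2 : y ≤ y2 := (List.pairwise_cons.1 (List.pairwise_cons.1 hs).2).1 y2 (by simp)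
      rw [pvDiff_of_le hxy]
      simp only [pvOmin, List.headI]
      rw [min_eq_left (by omega)]

lemma pvMinD_Pl_eq_Am : ∀ {a : List Int}, a.Pairwise (· ≤ ·) → pvMinD (pvPl a) = pvAm a := by
  intro a
  induction a using pvAm.induct with
  | case1 => intro _; rfl
  | case2 x => intro _; rfl
  | case3 x y t ih =>
    intro hs
    have hs' : (y :: t).Pairwise (· ≤ ·) := (List.pairwise_cons.1 hs).2
    rw [show pvPl (x :: y :: t) = ((y :: t).map (fun z => (x, z))) ++ pvPl (y :: t) from rfl]
    rw [pvMinD_append, pvMinD_map_cons hs (by simp), ih hs']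
    simp [pvAm, List.headI]

lemma pvQ_false_cons (x : Int) (t : List Int) :
    pvQ false (x :: t)
      = (t.filter (fun y => !(y == x))).map (fun y => (x, y)) ++ pvQ false t := by
  unfold pvQ
  simp only [pvPl, List.filter_append]
  congr 1
  rw [List.filter_map]
  congr 1
  apply List.filter_congr
  intro y _
  by_cases hxy : x = y
  · simp [pvElig, Function.comp, hxy]
  · simp [pvElig, Function.comp, hxy, Ne.symm hxy]

lemma pvMinD_Q_eq_Am_ded :
    ∀ {a : List Int}, a.Pairwise (· ≤ ·) → pvMinD (pvQ false a) = pvAm (pvDedS a) := by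
  intro a
  induction a with
  | nil => intro _; rfl
  | cons x t ih =>
    intro hs
    have hxall := (List.pairwise_cons.1 hs).1
    have hst : t.Pairwise (· ≤ ·) := (List.pairwise_cons.1 hs).2
    cases t with
    | nil => rfl
    | cons y t' =>
      rw [pvQ_false_cons, pvMinD_append]
      by_cases hyx : y = x
      · subst hyx
        -- t = y :: t' with y = x: dedS (y::y::t') = dedS (y::t')
        have hded : pvDedS (y :: y :: t') = pvDedS (y :: t') := by
          simp [pvDedS, pvDedFrom]
        rw [hded, ← ih hst]
        cases hu : (y :: t').filter (fun z => !(z == y)) with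
        | nil => simp [pvMinD, pvOmin]
        | cons z u' =>
          have hz : z ∈ (y :: t').filter (fun z => !(z == y)) := by
            rw [hu]; exact List.mem_cons_self
          have hz2 := List.mem_filter.1 hz
          have hzy : z ≠ y := by simpa using hz2.2
          have hzt : z ∈ t' := by
            rcases List.mem_cons.1 hz2.1 with rfl | h
            · exact absurd rfl hzy
            · exact h
          have hxz : y ≤ z := hxall z (by simp [hzt])
          have hmem : (y, z) ∈ pvQ false (y :: t') := by
            unfold pvQ
            apply List.mem_filter.2
            refine ⟨?_, ?_⟩
            · simp only [pvPl, List.mem_append, List.mem_map]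
              exact Or.inl ⟨z, hzt, rfl⟩
            · simp [pvElig, Ne.symm hzy]
          cases hw : pvMinD (pvQ false (y :: t')) with
          | none =>
            rw [(pvMinD_eq_none_iff _).1 hw] at hmem
            simp at hmem
          | some w =>
            have hwle : w ≤ pvDiff (y, z) := pvMinD_le_of_mem hmem hw
            rw [pvDiff_of_le hxz] at hwle
            have hpw : (y :: z :: u').Pairwise (· ≤ ·) := by
              apply List.pairwise_cons.2
              refine ⟨?_, ?_⟩
              · intro b hb
                have hbm : b ∈ (y :: t').filter (fun z => !(z == y)) := by
                  rw [hu]; exact hb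
                have hb2 := List.mem_filter.1 hbm
                have hby : b ≠ y := by simpa using hb2.2
                rcases List.mem_cons.1 hb2.1 with rfl | hbt
                · exact absurd rfl hby
                · exact hxall b (by simp [hbt])
              · have hsub : (z :: u').Sublist (y :: t') := hu ▸ List.filter_sublist
                exact List.Pairwise.sublist hsub hst
            have hmap := pvMinD_map_cons hpw (t := z :: u') (by simp)
            simp only [List.headI] at hmap
            rw [hmap]
            simp only [pvOmin]
            rw [min_eq_right hwle]
      · have hxy : x ≤ y := hxall y (by simp)
        have hufull : (y :: t').filter (fun z => !(z == x)) = y :: t' :=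
          List.filter_eq_self.2 (fun z hz => by
            rcases List.mem_cons.1 hz with rfl | hz'
            · simp [hyx]
            · have := (List.pairwise_cons.1 hst).1 z hz'
              simp
              omega)
        rw [hufull]
        have hmap := pvMinD_map_cons hs (t := y :: t') (by simp)
        simp only [List.headI] at hmap
        rw [hmap, ih hst]
        simp [pvDedS, pvDedFrom, hyx, pvAm]

lemma pvFilter_Pl_eq_W {d : Int} :
    ∀ {a : List Int}, a.Pairwise (· ≤ ·) → (∀ p ∈ pvPl a, d ≤ pvDiff p) →
      (pvPl a).filter (fun p => pvDiff p == d) = pvW d true a := by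
  intro a
  induction a with
  | nil => intro _ _; rfl
  | cons x t ih =>
    intro hs hb
    obtain ⟨hx, ht⟩ := List.pairwise_cons.1 hs
    rw [show pvPl (x :: t) = (t.map (fun y => (x, y))) ++ pvPl t from rfl, List.filter_append,
      show pvW d true (x :: t)
          = ((t.takeWhile (fun y => y - x == d)).map (fun y => (x, y))) ++ pvW d true t from by
        simp [pvW]]
    congr 1
    · rw [List.filter_map]
      have h1 : t.filter ((fun p => pvDiff p == d) ∘ (fun y => (x, y)))
          = t.filter (fun y => y - x == d) := by
        apply List.filter_congr
        intro y hy
        simp [Function.comp, pvDiff_of_le (hx y hy)]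
      rw [h1, pvFilter_eq_takeWhile ht (fun y hy => by
        have := hb (x, y) (List.mem_append_left _ (List.mem_map.2 ⟨y, hy, rfl⟩))
        rw [pvDiff_of_le (hx y hy)] at this
        exact this)]
    · exact ih ht (fun p hp => hb p (List.mem_append_right _ hp))

lemma pvFilter_Q_eq_W {d : Int} :
    ∀ {a : List Int}, a.Pairwise (· ≤ ·) → (∀ p ∈ pvQ false a, d ≤ pvDiff p) →
      (pvQ false a).filter (fun p => pvDiff p == d) = pvW d false a := by
  intro a
  induction a with
  | nil => intro _ _; rfl
  | cons x t ih =>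
    intro hs hb
    obtain ⟨hx, ht⟩ := List.pairwise_cons.1 hs
    rw [pvQ_false_cons, List.filter_append]
    have hW : pvW d false (x :: t)
        = ((t.dropWhile (fun y => y == x)).takeWhile (fun y => y - x == d)).map (fun y => (x, y))
          ++ pvW d false t := by
      simp [pvW]
    rw [hW]
    congr 1
    · rw [pvFilter_ne_eq_dropWhile hs] at *
      rw [List.filter_map]
      set u := t.dropWhile (fun y => y == x) with hu
      have husub : u.Sublist t := List.dropWhile_sublist _
      have hupw : u.Pairwise (· ≤ ·) := List.Pairwise.sublist husub ht
      have humem : ∀ y ∈ u, y ∈ t ∧ y ≠ x := by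
        intro y hy
        have hyf : y ∈ t.filter (fun y => !(y == x)) := by
          rw [pvFilter_ne_eq_dropWhile hs]; exact hy
        have := List.mem_filter.1 hyf
        exact ⟨this.1, by simpa using this.2⟩
      have h1 : u.filter ((fun p => pvDiff p == d) ∘ (fun y => (x, y)))
          = u.filter (fun y => y - x == d) := by
        apply List.filter_congr
        intro y hy
        simp [Function.comp, pvDiff_of_le (hx y (humem y hy).1)]
      rw [h1, pvFilter_eq_takeWhile hupw (fun y hy => by
        have hmem : (x, y) ∈ pvQ false (x :: t) := by
          rw [pvQ_false_cons]
          apply List.mem_append_left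
          apply List.mem_map.2
          refine ⟨y, ?_, rfl⟩
          rw [pvFilter_ne_eq_dropWhile hs]
          exact hy
        have := hb (x, y) hmem
        rw [pvDiff_of_le (hx y (humem y hy).1)] at this
        exact this)]
    · exact ih ht (fun p hp => hb p (by rw [pvQ_false_cons]; exact List.mem_append_right _ hp))

lemma pvCore_eq {a : List Int} (hs : a.Pairwise (· ≤ ·)) (allow : Bool) :
    pvCoreA allow a = pvCoreB allow a := by
  cases allow with
  | true =>
    have hQ : pvQ true a = pvPl a := by
      unfold pvQ
      exact List.filter_eq_self.2 (fun p _ => by simp [pvElig])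
    unfold pvCoreA pvCoreB
    rw [hQ]
    simp only [if_true]
    generalize hA : pvAm a = o
    cases o with
    | none =>
      have hmn : pvMinD (pvPl a) = none := by rw [pvMinD_Pl_eq_Am hs, hA]
      rw [(pvMinD_eq_none_iff _).1 hmn]
      rfl
    | some dv =>
      have hmd : pvMinD (pvPl a) = some dv := by rw [pvMinD_Pl_eq_Am hs, hA]
      rw [hmd]
      have hpred : (pvPl a).filter (fun p => (some dv : Option Int) == some (pvDiff p))
          = (pvPl a).filter (fun p => pvDiff p == dv) :=
        List.filter_congr (fun p _ => by simp [eq_comm])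
      rw [hpred, pvFilter_Pl_eq_W hs (fun p hp => pvMinD_le_of_mem hp hmd)]
  | false =>
    unfold pvCoreA pvCoreB
    simp only [Bool.false_eq_true, if_false]
    generalize hA : pvAm (pvDedS a) = o
    cases o with
    | none =>
      have hmn : pvMinD (pvQ false a) = none := by rw [pvMinD_Q_eq_Am_ded hs, hA]
      rw [(pvMinD_eq_none_iff _).1 hmn]
      rfl
    | some dv =>
      have hmd : pvMinD (pvQ false a) = some dv := by rw [pvMinD_Q_eq_Am_ded hs, hA]
      rw [hmd]
      have hpred : (pvQ false a).filter (fun p => (some dv : Option Int) == some (pvDiff p))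
          = (pvQ false a).filter (fun p => pvDiff p == dv) :=
        List.filter_congr (fun p _ => by simp [eq_comm])
      rw [hpred, pvFilter_Q_eq_W hs (fun p hp => pvMinD_le_of_mem hp hmd)]

lemma pvCoreA_mem_le {a : List Int} (hs : a.Pairwise (· ≤ ·)) (allow : Bool) :
    ∀ p ∈ pvCoreA allow a, p.1 ≤ p.2 := by
  intro p hp
  unfold pvCoreA pvQ at hp
  exact pvPl_mem_le hs p (List.mem_filter.1 (List.mem_filter.1 hp).1).1

lemma pvMapSortPair_id {L : List (Int × Int)} (h : ∀ p ∈ L, p.1 ≤ p.2) :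
    L.map pvSortPair = L := by
  have h2 : ∀ p ∈ L, pvSortPair p = id p := fun p hp => by
    have hn : ¬ (p.2 < p.1) := not_lt.2 (h p hp)
    simp [pvSortPair, hn]
  rw [List.map_congr_left h2, List.map_id]

-- ===== VERDICT (by name: the statement is the Claim_ definition above) =====
theorem pairs_with_smallest_difference_spec : Claim_equal_pairs_with_smallest_difference := by
  intro arr allow sp up _hdom hpre
  unfold Spec_pairs_with_smallest_difference
  rw [pvPortA_eq, pvPortB_eq]
  have hs : (PySem.List.sorted arr (fun x => x)).Pairwise (· ≤ ·) :=
    PySem.List.sorted_pairwise arr (fun x => x)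
  have hcore := pvCore_eq hs allow
  have hord := pvCoreA_mem_le hs allow
  set L := pvCoreA allow (PySem.List.sorted arr (fun x => x)) with hL
  have hmap : L.map pvSortPair = L := pvMapSortPair_id hord
  cases up with
  | false =>
    cases sp with
    | false => simpa [hmap, ← hcore] using rfl
    | true => simp only [if_true, if_false, Bool.false_eq_true, ← hcore, ← hL, hmap]
  | true =>
    cases sp with
    | false => exact absurd ⟨rfl, rfl⟩ hpre
    | true =>
      have hordS : ∀ p ∈ (PySem.Set.ofList L : List (Int × Int)), p.1 ≤ p.2 := by
        intro p hp
        exact hord p ((PySem.Set.mem_ofList L p).1 hp)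
      have hmapS := pvMapSortPair_id hordS
      simp only [if_true, ← hcore, ← hL, hmap, hmapS]
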